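-- pv_equiv track=rewrite | github.com/albinjohn366/Exam_Schedule | scheduling_standard_way.py | constraint_check
-- ===== SOURCE A (Python) =====
-- constraints = [('A', 'B', 'C'), ('B', 'G', 'A'), ('C', 'D', 'E'),
--                ('C', 'D', 'F'), ('B', 'F', 'C')]
--
-- days = {'Monday', 'Tuesday', 'Wednesday'}
--
-- def constraint_check(dictionary):
--     # Iterating over days and finding exams on each day
--     for day in days:
--         slot = []
--         for key in dictionary:
--             if dictionary[key] == day:
--                 slot.append(key)
--
--         # Checking if the exams on each day contradicts the constraints
--         for constraint in constraints:
--             count = 0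
--             for item in constraint:
--                 if item in slot:
--                     count += 1
--                 if count > 1:
--                     return False
--     return True
-- ===== SOURCE B (Python) =====
-- constraints = [('A', 'B', 'C'), ('B', 'G', 'A'), ('C', 'D', 'E'),
--                ('C', 'D', 'F'), ('B', 'F', 'C')]
--
-- days = {'Monday', 'Tuesday', 'Wednesday'}
--
-- def constraint_check(dictionary):
--     # Constraint-first: for each constraint, track in-range days already seen
--     # among its items; two items on the same day violate it.
--     for constraint in constraints:
--         seen = set()
--         for item in constraint:
--             day = dictionary.get(item)
--             if day in days:
--                 if day in seen:
--                     return False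
--                 seen.add(day)
--     return True
-- ===== Notes on version B (the rewrite author's own statement) =====
-- stated objective: simpler
-- what changed: Replaces the day-outer loop that rebuilds a slot list per day and rescans every constraint against it with a single constraint-first pass that looks each item up directly and tracks the in-range days already seen in a small set.
import Mathlib
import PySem

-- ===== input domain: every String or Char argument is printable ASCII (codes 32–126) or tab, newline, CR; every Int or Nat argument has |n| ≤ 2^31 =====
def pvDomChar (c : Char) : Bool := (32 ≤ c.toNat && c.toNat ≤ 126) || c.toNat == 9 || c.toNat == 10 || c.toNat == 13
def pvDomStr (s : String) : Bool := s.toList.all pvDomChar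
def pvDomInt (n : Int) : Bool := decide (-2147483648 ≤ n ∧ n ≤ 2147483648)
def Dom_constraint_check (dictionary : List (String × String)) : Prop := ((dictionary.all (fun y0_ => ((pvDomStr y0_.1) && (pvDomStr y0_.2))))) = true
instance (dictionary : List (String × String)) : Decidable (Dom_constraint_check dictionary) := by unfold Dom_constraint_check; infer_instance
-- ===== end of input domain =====

-- B drops the day-outer loop and per-day slot lists: it walks each constraint once,
-- looking items up directly and tracking the in-range days already seen in a set (simpler).

-- ===== PORT A =====
-- module constants
def pvConstraints : List (List String) :=
  [["A", "B", "C"], ["B", "G", "A"], ["C", "D", "E"], ["C", "D", "F"], ["B", "F", "C"]]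
-- 'days' is a Python set literal; A iterates it, but the returned Bool does not depend
-- on the iteration order, so we fix the literal order.
def pvDays : List String := ["Monday", "Tuesday", "Wednesday"]

-- inner 'for item in constraint' with the running count and early 'return False'
def pvCountLoop (slot : List String) : List String → Int → Bool
  | [], _ => true
  | item :: rest, count =>
    let count := if slot.contains item then count + 1 else count
    if 1 < count then false else pvCountLoop slot rest count

-- 'for constraint in constraints'
def pvConsLoop (slot : List String) : List (List String) → Bool
  | [] => true
  | c :: rest => if pvCountLoop slot c 0 then pvConsLoop slot rest else false

-- 'for day in days' building slot then checking the constraints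
def pvDayLoop (d : PySem.Dict String String) : List String → Bool
  | [] => true
  | day :: rest =>
    let slot := d.items.foldl (fun s p => if p.2 == day then s ++ [p.1] else s) []
    if pvConsLoop slot pvConstraints then pvDayLoop d rest else false

def constraint_check (dictionary : List (String × String)) : Bool :=
  pvDayLoop (PySem.Dict.ofList dictionary) pvDays

-- ===== PORT B =====
-- 'for item in constraint' with the seen-days set and early 'return False'
def pvAltItemLoop (d : PySem.Dict String String) : List String → PySem.Set String → Bool
  | [], _ => true
  | item :: rest, seen =>
    match d.get? item with
    | some day =>
      if pvDays.contains day then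
        if seen.contains day then false
        else pvAltItemLoop d rest (PySem.Set.add seen day)
      else pvAltItemLoop d rest seen
    | none => pvAltItemLoop d rest seen

-- 'for constraint in constraints'
def pvAltConsLoop (d : PySem.Dict String String) : List (List String) → Bool
  | [] => true
  | c :: rest => if pvAltItemLoop d c PySem.Set.empty then pvAltConsLoop d rest else false

def constraint_check_alt (dictionary : List (String × String)) : Bool :=
  pvAltConsLoop (PySem.Dict.ofList dictionary) pvConstraints

-- ===== PRECONDITION & SPEC =====
def Spec_constraint_check (dictionary : List (String × String)) (out : Bool) : Prop := out = constraint_check_alt dictionary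
instance (dictionary : List (String × String)) (out : Bool) : Decidable (Spec_constraint_check dictionary out) := by unfold Spec_constraint_check; infer_instance

-- ===== CLAIM (what is proved, stated in full; the proofs are below) =====
def Claim_equal_constraint_check : Prop := ∀ (dictionary : List (String × String)), Dom_constraint_check dictionary → Spec_constraint_check dictionary (constraint_check dictionary)

-- ===== LEMMAS AND PROOFS =====

-- number of items of c assigned to day 'day' by the dict d
def pvCnt (d : PySem.Dict String String) (day : String) (c : List String) : Nat :=
  c.countP (fun i => d.get? i == some day)

theorem pvCountLoop_eq (slot : List String) (c : List String) :
    ∀ count : Int, count ≤ 1 →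
      pvCountLoop slot c count = decide (count + (c.countP (fun i => slot.contains i) : Int) ≤ 1) := by
  induction c with
  | nil => intro count h; simp [pvCountLoop]; omega
  | cons item rest ih =>
    intro count h
    simp only [pvCountLoop, List.countP_cons]
    by_cases hm : slot.contains item = true
    · rw [if_pos hm, if_pos hm]
      by_cases h2 : (1 : Int) < count + 1
      · rw [if_pos h2]
        symm
        rw [decide_eq_false_iff_not]
        push_cast; omega
      · rw [if_neg h2, ih (count + 1) (by omega), decide_eq_decide]
        push_cast; omega
    · rw [if_neg hm, if_neg hm, if_neg (show ¬ (1 : Int) < count by omega), ih count h,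
        decide_eq_decide]
      push_cast; omega

theorem pvConsLoop_eq (slot : List String) (cs : List (List String)) :
    pvConsLoop slot cs = cs.all (fun c => pvCountLoop slot c 0) := by
  induction cs with
  | nil => rfl
  | cons c rest ih =>
    simp only [pvConsLoop, List.all_cons, ih]
    by_cases h : pvCountLoop slot c 0 = true <;> simp [h]

theorem pvDayLoop_eq (d : PySem.Dict String String) (ds : List String) :
    pvDayLoop d ds = ds.all (fun day =>
      pvConsLoop (d.items.foldl (fun s p => if p.2 == day then s ++ [p.1] else s) []) pvConstraints) := by
  induction ds with
  | nil => rfl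
  | cons day rest ih =>
    simp only [pvDayLoop, List.all_cons, ih]
    by_cases h : pvConsLoop (d.items.foldl (fun s p => if p.2 == day then s ++ [p.1] else s) []) pvConstraints = true <;> simp [h]

-- the slot-building fold is filter-then-map
theorem pvSlot_foldl (day : String) (l : List (String × String)) :
    ∀ acc : List String,
      l.foldl (fun s p => if p.2 == day then s ++ [p.1] else s) acc
        = acc ++ (l.filter (fun p => p.2 == day)).map (fun p => p.1) := by
  induction l with
  | nil => intro acc; simp
  | cons q rest ih =>
    intro acc
    by_cases hq : (q.2 == day) = true
    · simp only [List.foldl_cons, List.filter_cons, hq, if_pos hq, List.map_cons, ih]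
      simp
    · simp only [List.foldl_cons, List.filter_cons, hq, if_neg hq, ih]
      simp

-- the slot built for 'day' contains exactly the keys mapped to 'day'
theorem pvSlot_contains (d : PySem.Dict String String) (hnd : d.keys.Nodup) (day item : String) :
    ((d.items.foldl (fun s p => if p.2 == day then s ++ [p.1] else s) []).contains item)
      = (d.get? item == some day) := by
  rw [pvSlot_foldl day d.items []]
  simp only [List.nil_append]
  by_cases h : d.get? item = some day
  · have hmem : (item, day) ∈ d.items := PySem.Dict.mem_items_of_get?_eq_some d h
    have hin : item ∈ (d.items.filter (fun p => p.2 == day)).map (fun p => p.1) := by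
      simp only [List.mem_map, List.mem_filter]
      exact ⟨(item, day), ⟨hmem, by simp⟩, rfl⟩
    simp [h, hin]
  · have hnin : item ∉ (d.items.filter (fun p => p.2 == day)).map (fun p => p.1) := by
      simp only [List.mem_map, List.mem_filter]
      rintro ⟨⟨k, v⟩, ⟨hmem, hv⟩, rfl⟩
      have hvd : v = day := by simpa using hv
      subst hvd
      exact h (PySem.Dict.get?_of_mem_items d hmem hnd)
    simp only [List.contains_eq_mem, decide_eq_false hnin]
    simp [h]

theorem pvAltItemLoop_eq (d : PySem.Dict String String) (c : List String) :
    ∀ seen : PySem.Set String,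
      (pvAltItemLoop d c seen = true ↔
        ∀ day ∈ pvDays, (if day ∈ seen then 1 else 0) + pvCnt d day c ≤ 1) := by
  induction c with
  | nil =>
    intro seen
    simp only [pvAltItemLoop, pvCnt, List.countP_nil, true_iff]
    intro day _; split <;> omega
  | cons item rest ih =>
    intro seen
    cases hget : d.get? item with
    | none =>
      have hl : pvAltItemLoop d (item :: rest) seen = pvAltItemLoop d rest seen := by
        simp [pvAltItemLoop, hget]
      rw [hl, ih seen]
      apply forall₂_congr; intro day _
      have hp : (d.get? item == some day) = false := by simp [hget]
      simp [pvCnt, List.countP_cons, hp]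
    | some day0 =>
      by_cases hvalid : day0 ∈ pvDays
      · by_cases hseen : day0 ∈ seen
        · have hl : pvAltItemLoop d (item :: rest) seen = false := by
            simp [pvAltItemLoop, hget, hvalid, hseen]
          rw [hl]
          simp only [Bool.false_eq_true, false_iff, not_forall]
          refine ⟨day0, hvalid, ?_⟩
          have hp : (d.get? item == some day0) = true := by simp [hget]
          have hcnt : pvCnt d day0 (item :: rest) = pvCnt d day0 rest + 1 := by
            simp [pvCnt, List.countP_cons, hp]
          rw [hcnt, if_pos hseen]
          omega
        · have hl : pvAltItemLoop d (item :: rest) seen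
              = pvAltItemLoop d rest (PySem.Set.add seen day0) := by
            simp [pvAltItemLoop, hget, hvalid, hseen]
          rw [hl, ih (PySem.Set.add seen day0)]
          apply forall₂_congr; intro day _
          by_cases hd : day = day0
          · subst hd
            have hp : (d.get? item == some day) = true := by simp [hget]
            have hcnt : pvCnt d day (item :: rest) = pvCnt d day rest + 1 := by
              simp [pvCnt, List.countP_cons, hp]
            rw [hcnt]
            simp only [PySem.Set.mem_add]
            simp [hseen]
          · have hp : (d.get? item == some day) = false := by
              simp only [hget]
              exact beq_eq_false_iff_ne.mpr (by simpa using fun h => hd h.symm)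
            have hcnt : pvCnt d day (item :: rest) = pvCnt d day rest := by
              simp [pvCnt, List.countP_cons, hp]
            rw [hcnt]
            simp only [PySem.Set.mem_add]
            simp [hd]
      · have hl : pvAltItemLoop d (item :: rest) seen = pvAltItemLoop d rest seen := by
          simp [pvAltItemLoop, hget, hvalid]
        rw [hl, ih seen]
        apply forall₂_congr; intro day hday
        have hne : day ≠ day0 := by
          rintro rfl; exact hvalid hday
        have hp : (d.get? item == some day) = false := by
          simp only [hget]
          exact beq_eq_false_iff_ne.mpr (by simpa using fun h => hne h.symm)
        simp [pvCnt, List.countP_cons, hp]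

theorem pvAltConsLoop_eq (d : PySem.Dict String String) (cs : List (List String)) :
    pvAltConsLoop d cs = cs.all (fun c => pvAltItemLoop d c PySem.Set.empty) := by
  induction cs with
  | nil => rfl
  | cons c rest ih =>
    simp only [pvAltConsLoop, List.all_cons, ih]
    by_cases h : pvAltItemLoop d c PySem.Set.empty = true <;> simp [h]

theorem pvConsLoop_iff (d : PySem.Dict String String) (hnd : d.keys.Nodup) (day : String) :
    pvConsLoop (d.items.foldl (fun s p => if p.2 == day then s ++ [p.1] else s) []) pvConstraints = true
      ↔ ∀ c ∈ pvConstraints, pvCnt d day c ≤ 1 := by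
  rw [pvConsLoop_eq, List.all_eq_true]
  apply forall₂_congr; intro c _
  rw [pvCountLoop_eq _ _ 0 (by omega)]
  have hcong : c.countP (fun i =>
      (d.items.foldl (fun s p => if p.2 == day then s ++ [p.1] else s) []).contains i)
      = pvCnt d day c := by
    apply List.countP_congr; intro i _
    rw [pvSlot_contains d hnd day i]
  rw [hcong, decide_eq_true_iff]
  push_cast; omega

theorem pvAltItem_empty_iff (d : PySem.Dict String String) (c : List String) :
    pvAltItemLoop d c PySem.Set.empty = true ↔ ∀ day ∈ pvDays, pvCnt d day c ≤ 1 := by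
  rw [pvAltItemLoop_eq d c PySem.Set.empty]
  apply forall₂_congr; intro day _
  simp [PySem.Set.empty]

-- ===== VERDICT (by name: the statement is the Claim_ definition above) =====
theorem constraint_check_spec : Claim_equal_constraint_check := by
  intro dictionary _
  unfold Spec_constraint_check constraint_check constraint_check_alt
  have hnd : (PySem.Dict.ofList dictionary).keys.Nodup := PySem.Dict.nodup_keys_ofList dictionary
  rw [Bool.eq_iff_iff, pvDayLoop_eq, pvAltConsLoop_eq]
  simp only [List.all_eq_true]
  constructor
  · intro hA c hc
    rw [pvAltItem_empty_iff]
    intro day hday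
    exact (pvConsLoop_iff _ hnd day).mp (hA day hday) c hc
  · intro hB day hday
    rw [pvConsLoop_iff _ hnd day]
    intro c hc
    exact (pvAltItem_empty_iff _ c).mp (hB c hc) day hday
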